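-- pv_equiv track=rewrite | github.com/JoeyJoHa/RH-OLMv1-RBAC-Manager-Tool | rbac-manager/libs/opm/client.py | _is_registry_match
-- ===== SOURCE A (Python) =====
-- def _is_registry_match(target_registry: str, auth_registry: str) -> bool:
--     """
--     Check if two registry hostnames match (with fuzzy matching for common cases)
--
--     Args:
--         target_registry: The registry we're looking for auth
--         auth_registry: The registry in the auth file
--
--     Returns:
--         bool: True if they match
--     """
--     if target_registry == auth_registry:
--         return True
--
--     # Common registry aliases
--     registry_aliases = {
--         'docker.io': ['index.docker.io', 'registry-1.docker.io'],
--         'registry.redhat.io': ['registry.access.redhat.com'],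
--         'quay.io': ['quay.io'],
--     }
--
--     # Check if target matches any aliases of auth_registry
--     for canonical, aliases in registry_aliases.items():
--         if auth_registry == canonical and target_registry in aliases:
--             return True
--         if target_registry == canonical and auth_registry in aliases:
--             return True
--
--     return False
-- ===== SOURCE B (Python) =====
-- def _is_registry_match(target_registry: str, auth_registry: str) -> bool:
--     """Check if two registry hostnames match (with fuzzy matching for common cases)"""
--     if target_registry == auth_registry:
--         return True
--     # The alias relation is symmetric, so state it as a set of unordered pairs
--     # (canonicalised as lexicographically sorted tuples) and do one membership test.
--     EQUIVALENT_PAIRS = {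
--         ('docker.io', 'index.docker.io'),
--         ('docker.io', 'registry-1.docker.io'),
--         ('registry.access.redhat.com', 'registry.redhat.io'),
--     }
--     if target_registry < auth_registry:
--         pair = (target_registry, auth_registry)
--     else:
--         pair = (auth_registry, target_registry)
--     return pair in EQUIVALENT_PAIRS
-- ===== Notes on version B (the rewrite author's own statement) =====
-- stated objective: alternative
-- what changed: Recasts the symmetric alias check: instead of looping over canonical->alias-list groups with two directional tests per group, B canonicalises the two hostnames into one lexicographically sorted pair and does a single membership test in a set of unordered equivalent pairs (the quay.io self-alias disappears into the equality short-circuit).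
import Mathlib
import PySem

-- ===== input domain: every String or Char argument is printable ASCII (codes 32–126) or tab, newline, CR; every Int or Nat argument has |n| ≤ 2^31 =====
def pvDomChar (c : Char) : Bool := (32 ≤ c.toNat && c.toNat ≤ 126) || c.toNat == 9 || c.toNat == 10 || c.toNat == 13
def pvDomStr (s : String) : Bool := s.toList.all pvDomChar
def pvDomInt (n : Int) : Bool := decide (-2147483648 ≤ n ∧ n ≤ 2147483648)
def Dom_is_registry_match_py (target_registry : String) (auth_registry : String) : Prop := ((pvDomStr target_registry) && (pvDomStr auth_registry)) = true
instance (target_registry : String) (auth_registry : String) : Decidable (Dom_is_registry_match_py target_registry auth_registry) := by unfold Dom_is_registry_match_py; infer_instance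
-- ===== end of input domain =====

-- B recasts A's directional loop over canonical->alias-list groups as a single
-- membership test of the lexicographically sorted hostname pair in a set of
-- unordered equivalent pairs (alternative decomposition; no speed claim).

-- ===== PORT A =====
def pvRegistryAliases : List (String × List String) :=
  [("docker.io", ["index.docker.io", "registry-1.docker.io"]),
   ("registry.redhat.io", ["registry.access.redhat.com"]),
   ("quay.io", ["quay.io"])]

-- the 'for canonical, aliases in registry_aliases.items()' loop with its early returns
def pvMatchLoop (target_registry auth_registry : String) : List (String × List String) → Bool
  | [] => false
  | (canonical, aliases) :: rest =>
    if auth_registry == canonical && aliases.contains target_registry then true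
    else if target_registry == canonical && aliases.contains auth_registry then true
    else pvMatchLoop target_registry auth_registry rest

def is_registry_match_py (target_registry : String) (auth_registry : String) : Bool :=
  if target_registry == auth_registry then true
  else pvMatchLoop target_registry auth_registry pvRegistryAliases

-- ===== PORT B =====
-- the set of unordered equivalent pairs, each stored as a sorted tuple
def pvEquivalentPairs : PySem.Set (String × String) :=
  PySem.Set.ofList
    [("docker.io", "index.docker.io"),
     ("docker.io", "registry-1.docker.io"),
     ("registry.access.redhat.com", "registry.redhat.io")]

def is_registry_match_py_alt (target_registry : String) (auth_registry : String) : Bool :=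
  if target_registry == auth_registry then true
  else
    let pair :=
      if target_registry < auth_registry then (target_registry, auth_registry)
      else (auth_registry, target_registry)
    pvEquivalentPairs.contains pair

-- ===== PRECONDITION & SPEC =====
def Spec_is_registry_match_py (target_registry : String) (auth_registry : String) (out : Bool) : Prop := out = is_registry_match_py_alt target_registry auth_registry
instance (target_registry : String) (auth_registry : String) (out : Bool) : Decidable (Spec_is_registry_match_py target_registry auth_registry out) := by unfold Spec_is_registry_match_py; infer_instance

-- ===== CLAIM (what is proved, stated in full; the proofs are below) =====
def Claim_equal_is_registry_match_py : Prop := ∀ (target_registry : String) (auth_registry : String), Dom_is_registry_match_py target_registry auth_registry → Spec_is_registry_match_py target_registry auth_registry (is_registry_match_py target_registry auth_registry)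

-- ===== LEMMAS AND PROOFS =====

-- for t ≠ a, the sorted pair equals a sorted literal pair (x,y), x < y,
-- iff {t,a} = {x,y} as an unordered pair
lemma pvSortedPair_eq (t a x y : String) (hxy : x < y) (h : t ≠ a) :
    ((if t < a then (t, a) else (a, t)) = (x, y)) ↔
      ((t = x ∧ a = y) ∨ (t = y ∧ a = x)) := by
  split_ifs with hlt
  · simp only [Prod.mk.injEq]
    constructor
    · exact fun ⟨h1, h2⟩ => Or.inl ⟨h1, h2⟩
    · rintro (⟨h1, h2⟩ | ⟨h1, h2⟩)
      · exact ⟨h1, h2⟩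
      · exact absurd (h1 ▸ h2 ▸ hlt) (not_lt.mpr hxy.le)
  · simp only [Prod.mk.injEq]
    have hge : a < t := lt_of_le_of_ne (not_lt.mp hlt) (Ne.symm h)
    constructor
    · exact fun ⟨h1, h2⟩ => Or.inr ⟨h2, h1⟩
    · rintro (⟨h1, h2⟩ | ⟨h1, h2⟩)
      · exact absurd (h1 ▸ h2 ▸ hge) (not_lt.mpr hxy.le)
      · exact ⟨h2, h1⟩

-- ===== VERDICT (by name: the statement is the Claim_ definition above) =====
theorem is_registry_match_py_spec : Claim_equal_is_registry_match_py := by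
  intro t a _
  unfold Spec_is_registry_match_py is_registry_match_py is_registry_match_py_alt
  by_cases h : t = a
  · simp [h]
  · simp only [beq_iff_eq, h, if_false]
    rw [Bool.eq_iff_iff]
    rw [show pvEquivalentPairs = [("docker.io", "index.docker.io"),
      ("docker.io", "registry-1.docker.io"),
      ("registry.access.redhat.com", "registry.redhat.io")] from by decide]
    simp only [pvRegistryAliases, pvMatchLoop, PySem.Set.contains, List.contains_cons,
      List.contains_nil, Bool.or_eq_true, Bool.and_eq_true, beq_iff_eq]
    rw [pvSortedPair_eq t a _ _ (by rw [String.lt_iff_toList_lt]; decide) h, pvSortedPair_eq t a _ _ (by rw [String.lt_iff_toList_lt]; decide) h,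
        pvSortedPair_eq t a _ _ (by rw [String.lt_iff_toList_lt]; decide) h]
    split_ifs with h1 h2 h3 h4 h5 h6 <;> simp_all <;> tauto
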